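-- pv_equiv track=rewrite | github.com/WhiteMetagross/newFastReID | tools/generate_model_config.py | _detect_head_type
-- ===== SOURCE A (Python) =====
-- from typing import Dict, Any, Optional, List, Tuple
--
-- def _detect_head_type(layer_names: List[str]) -> str:
--     head_patterns = {
--         'EmbeddingHead': ['embedding', 'heads.embedding'],
--         'BNNeckHead': ['bnneck', 'bottleneck'],
--         'ReductionHead': ['reduction', 'heads.reduction'],
--         'LinearHead': ['linear', 'heads.linear'],
--     }
--
--     for head_type, patterns in head_patterns.items():
--         if any(any(pattern in name for pattern in patterns) for name in layer_names):
--             return head_type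
--
--     if any('heads.' in name for name in layer_names):
--         return 'EmbeddingHead'
--
--     return 'EmbeddingHead'
-- ===== SOURCE B (Python) =====
-- def _detect_head_type(layer_names):
--     pairs = [
--         ('EmbeddingHead', 'embedding'), ('EmbeddingHead', 'heads.embedding'),
--         ('BNNeckHead', 'bnneck'), ('BNNeckHead', 'bottleneck'),
--         ('ReductionHead', 'reduction'), ('ReductionHead', 'heads.reduction'),
--         ('LinearHead', 'linear'), ('LinearHead', 'heads.linear'),
--     ]
--     matched = set()
--     for name in layer_names:
--         for head_type, pattern in pairs:
--             if pattern in name: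
--                 matched.add(head_type)
--     for head_type in ['EmbeddingHead', 'BNNeckHead', 'ReductionHead', 'LinearHead']:
--         if head_type in matched:
--             return head_type
--     return 'EmbeddingHead'
-- ===== Notes on version B (the rewrite author's own statement) =====
-- stated objective: faster
-- what changed: Replaces A's per-category short-circuiting scans (up to four full passes over the names, one per head type) by a two-phase index-then-select: a single pass over all names builds the set of matched head types from a flat (head,pattern) pair list, then the fixed priority list is scanned for the first matched head, defaulting to 'EmbeddingHead'.
import Mathlib
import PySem

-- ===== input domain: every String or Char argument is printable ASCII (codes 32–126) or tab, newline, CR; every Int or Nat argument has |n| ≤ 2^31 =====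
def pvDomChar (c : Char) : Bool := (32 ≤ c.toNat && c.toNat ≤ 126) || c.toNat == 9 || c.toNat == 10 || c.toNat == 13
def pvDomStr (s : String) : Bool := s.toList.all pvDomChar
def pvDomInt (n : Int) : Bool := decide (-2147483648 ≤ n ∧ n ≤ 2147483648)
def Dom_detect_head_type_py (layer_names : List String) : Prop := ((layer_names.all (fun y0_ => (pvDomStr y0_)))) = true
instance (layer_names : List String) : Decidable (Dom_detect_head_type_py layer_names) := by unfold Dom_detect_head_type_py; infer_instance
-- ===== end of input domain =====

-- B replaces A's per-category short-circuiting scan by an index-then-select shape: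
-- one pass builds the set of matched head types, then the priority list picks the first match.

-- ===== PORT A =====
def pvHeadPatternsA : List (String × List String) :=
  [("EmbeddingHead", ["embedding", "heads.embedding"]),
   ("BNNeckHead", ["bnneck", "bottleneck"]),
   ("ReductionHead", ["reduction", "heads.reduction"]),
   ("LinearHead", ["linear", "heads.linear"])]

def detect_head_type_py (layer_names : List String) : String :=
  match pvHeadPatternsA.find? (fun hp =>
      layer_names.any (fun name => hp.2.any (fun pattern => PySem.Str.isIn pattern name))) with
  | some hp => hp.1
  | none =>
    if layer_names.any (fun name => PySem.Str.isIn "heads." name) then "EmbeddingHead"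
    else "EmbeddingHead"

-- ===== PORT B =====
def pvPairsB : List (String × String) :=
  [("EmbeddingHead", "embedding"), ("EmbeddingHead", "heads.embedding"),
   ("BNNeckHead", "bnneck"), ("BNNeckHead", "bottleneck"),
   ("ReductionHead", "reduction"), ("ReductionHead", "heads.reduction"),
   ("LinearHead", "linear"), ("LinearHead", "heads.linear")]

def detect_head_type_py_alt (layer_names : List String) : String :=
  let matched : PySem.Set String :=
    layer_names.foldl (fun acc name =>
      pvPairsB.foldl (fun a p => if PySem.Str.isIn p.2 name then PySem.Set.add a p.1 else a) acc)
      PySem.Set.empty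
  match (["EmbeddingHead", "BNNeckHead", "ReductionHead", "LinearHead"]).find?
      (fun h => PySem.Set.contains matched h) with
  | some h => h
  | none => "EmbeddingHead"

-- ===== PRECONDITION & SPEC =====
def Spec_detect_head_type_py (layer_names : List String) (out : String) : Prop := out = detect_head_type_py_alt layer_names
instance (layer_names : List String) (out : String) : Decidable (Spec_detect_head_type_py layer_names out) := by unfold Spec_detect_head_type_py; infer_instance

-- ===== CLAIM (what is proved, stated in full; the proofs are below) =====
def Claim_equal_detect_head_type_py : Prop := ∀ (layer_names : List String), Dom_detect_head_type_py layer_names → Spec_detect_head_type_py layer_names (detect_head_type_py layer_names)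

-- ===== LEMMAS AND PROOFS =====

theorem mem_inner_fold (ps : List (String × String)) (name : String)
    (acc : PySem.Set String) (h : String) (hnd : acc.Nodup) :
    (h ∈ ps.foldl (fun a p => if PySem.Str.isIn p.2 name then PySem.Set.add a p.1 else a) acc
      ↔ h ∈ acc ∨ ∃ p ∈ ps, p.1 = h ∧ PySem.Str.isIn p.2 name = true)
    ∧ (ps.foldl (fun a p => if PySem.Str.isIn p.2 name then PySem.Set.add a p.1 else a) acc).Nodup := by
  induction ps generalizing acc with
  | nil => simpa using hnd
  | cons q t ih =>
    simp only [List.foldl_cons]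
    by_cases hq : PySem.Str.isIn q.2 name = true
    · rw [if_pos hq]
      have := ih (PySem.Set.add acc q.1) (PySem.Set.nodup_add _ _ hnd)
      refine ⟨?_, this.2⟩
      rw [this.1, PySem.Set.mem_add]
      constructor
      · rintro (⟨ha | he⟩ | ⟨p, hp, h1, h2⟩)
        · exact Or.inl ha
        · exact Or.inr ⟨q, by simp, he.symm, hq⟩
        · exact Or.inr ⟨p, by simp [hp], h1, h2⟩
      · rintro (ha | ⟨p, hp, h1, h2⟩)
        · exact Or.inl (Or.inl ha)
        · rcases List.mem_cons.mp hp with rfl | hp'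
          · exact Or.inl (Or.inr h1.symm)
          · exact Or.inr ⟨p, hp', h1, h2⟩
    · rw [if_neg hq]
      have := ih acc hnd
      refine ⟨?_, this.2⟩
      rw [this.1]
      constructor
      · rintro (ha | ⟨p, hp, h1, h2⟩)
        · exact Or.inl ha
        · exact Or.inr ⟨p, by simp [hp], h1, h2⟩
      · rintro (ha | ⟨p, hp, h1, h2⟩)
        · exact Or.inl ha
        · rcases List.mem_cons.mp hp with rfl | hp'
          · exact absurd h2 hq
          · exact Or.inr ⟨p, hp', h1, h2⟩

theorem mem_outer_fold (names : List String) (acc : PySem.Set String) (h : String)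
    (hnd : acc.Nodup) :
    (h ∈ names.foldl (fun acc name =>
        pvPairsB.foldl (fun a p => if PySem.Str.isIn p.2 name then PySem.Set.add a p.1 else a) acc) acc
      ↔ h ∈ acc ∨ ∃ n ∈ names, ∃ p ∈ pvPairsB, p.1 = h ∧ PySem.Str.isIn p.2 n = true)
    ∧ (names.foldl (fun acc name =>
        pvPairsB.foldl (fun a p => if PySem.Str.isIn p.2 name then PySem.Set.add a p.1 else a) acc) acc).Nodup := by
  induction names generalizing acc with
  | nil => simpa using hnd
  | cons n t ih =>
    simp only [List.foldl_cons]
    have hin := mem_inner_fold pvPairsB n acc h hnd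
    have := ih _ hin.2
    refine ⟨?_, this.2⟩
    rw [this.1, hin.1]
    constructor
    · rintro ((ha | ⟨p, hp, h1, h2⟩) | ⟨m, hm, hex⟩)
      · exact Or.inl ha
      · exact Or.inr ⟨n, by simp, p, hp, h1, h2⟩
      · exact Or.inr ⟨m, by simp [hm], hex⟩
    · rintro (ha | ⟨m, hm, hex⟩)
      · exact Or.inl (Or.inl ha)
      · rcases List.mem_cons.mp hm with rfl | hm'
        · exact Or.inl (Or.inr hex)
        · exact Or.inr ⟨m, hm', hex⟩

theorem matched_mem (layer_names : List String) (h : String) :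
    (h ∈ layer_names.foldl (fun acc name =>
        pvPairsB.foldl (fun a p => if PySem.Str.isIn p.2 name then PySem.Set.add a p.1 else a) acc)
        PySem.Set.empty)
      ↔ ∃ n ∈ layer_names, ∃ p ∈ pvPairsB, p.1 = h ∧ PySem.Str.isIn p.2 n = true := by
  have := (mem_outer_fold layer_names PySem.Set.empty h (by simp [PySem.Set.empty])).1
  simpa [PySem.Set.empty] using this

-- ===== VERDICT (by name: the statement is the Claim_ definition above) =====
theorem detect_head_type_py_spec : Claim_equal_detect_head_type_py := by
  intro layer_names _
  unfold Spec_detect_head_type_py detect_head_type_py detect_head_type_py_alt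
  have key : ∀ h : String,
      PySem.Set.contains (layer_names.foldl (fun acc name =>
        pvPairsB.foldl (fun a p => if PySem.Str.isIn p.2 name then PySem.Set.add a p.1 else a) acc)
        PySem.Set.empty) h
      = layer_names.any (fun n => pvPairsB.any (fun p => p.1 == h && PySem.Str.isIn p.2 n)) := by
    intro h
    rw [Bool.eq_iff_iff, PySem.Set.contains_iff, matched_mem]
    simp [List.any_eq_true]
  simp only [key]
  simp [pvHeadPatternsA, pvPairsB, List.find?, List.any_eq_true]
  cases h1 : layer_names.any (fun name => PySem.Chars.isIn ['e','m','b','e','d','d','i','n','g'] name.toList || PySem.Chars.isIn ['h','e','a','d','s','.','e','m','b','e','d','d','i','n','g'] name.toList) <;>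
  cases h2 : layer_names.any (fun name => PySem.Chars.isIn ['b','n','n','e','c','k'] name.toList || PySem.Chars.isIn ['b','o','t','t','l','e','n','e','c','k'] name.toList) <;>
  cases h3 : layer_names.any (fun name => PySem.Chars.isIn ['r','e','d','u','c','t','i','o','n'] name.toList || PySem.Chars.isIn ['h','e','a','d','s','.','r','e','d','u','c','t','i','o','n'] name.toList) <;>
  cases h4 : layer_names.any (fun name => PySem.Chars.isIn ['l','i','n','e','a','r'] name.toList || PySem.Chars.isIn ['h','e','a','d','s','.','l','i','n','e','a','r'] name.toList) <;>
  simp_all
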